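-- pv_equiv track=rewrite | github.com/MaximeRivest/functai | functai/core.py | _derive_output_name
-- ===== SOURCE A (Python) =====
-- def _derive_output_name(desc: str) -> str:
--     """Derive a field name from a human description like 'think!'.
--
--     Keeps alphanumerics and underscores, lowercases, takes the first token.
--     """
--     s = ''.join(ch if (ch.isalnum() or ch == '_') else ' ' for ch in str(desc))
--     s = s.strip().lower()
--     if not s:
--         return "field"
--     # first token before whitespace
--     return s.split()[0]
--
--     # Arithmetic-ish
--     def __add__(self, other): return self._val() + other
--     def __radd__(self, other): return other + self._val()
--     def __sub__(self, other): return self._val() - other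
--     def __rsub__(self, other): return other - self._val()
--     def __mul__(self, other): return self._val() * other
--     def __rmul__(self, other): return other * self._val()
--     def __truediv__(self, other): return self._val() / other
--     def __rtruediv__(self, other): return other / self._val()
--     def __eq__(self, other): return self._val() == other
--     def __ne__(self, other): return self._val() != other
--     def __lt__(self, other): return self._val() < other
--     def __le__(self, other): return self._val() <= other
--     def __gt__(self, other): return self._val() > other
--     def __ge__(self, other): return self._val() >= other
-- ===== SOURCE B (Python) =====
-- def _derive_output_name(desc: str) -> str:
--     """Single char scan: skip leading non-word chars, collect the first
--     run of word chars lowercased, stop at its end."""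
--     buf = []
--     for ch in str(desc):
--         if ch.isalnum() or ch == '_':
--             buf.append(ch.lower())
--         elif buf:
--             break
--     return ''.join(buf) if buf else "field"
-- ===== Notes on version B (the rewrite author's own statement) =====
-- stated objective: simpler
-- what changed: Instead of building a whole space-substituted copy of the string, stripping, lowercasing and splitting it into tokens, B makes one character scan that skips leading non-word characters, accumulates the first run of word characters lowercased, and stops early at its end.
import Mathlib
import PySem

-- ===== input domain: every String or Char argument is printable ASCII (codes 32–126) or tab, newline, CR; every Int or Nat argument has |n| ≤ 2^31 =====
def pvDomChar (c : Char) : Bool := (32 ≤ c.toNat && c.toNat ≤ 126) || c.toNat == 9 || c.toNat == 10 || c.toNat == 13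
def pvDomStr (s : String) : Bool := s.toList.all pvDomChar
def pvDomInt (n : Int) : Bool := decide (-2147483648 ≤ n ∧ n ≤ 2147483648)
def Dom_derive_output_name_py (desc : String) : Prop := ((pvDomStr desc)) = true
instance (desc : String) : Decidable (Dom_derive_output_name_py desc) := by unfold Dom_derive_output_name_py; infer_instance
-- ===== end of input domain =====

-- B replaces A's build-whole-string / strip / lower / split pipeline by a single character scan
-- that collects the first run of word characters lowercased (objective: simpler, same O(n) cost).

-- the Python predicate 'ch.isalnum() or ch == "_"', shared by both programs
def pvOk (c : Char) : Bool := PySem.Chars.isalnum c || c == '_'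

-- ===== PORT A =====
def derive_output_name_py (desc : String) : String :=
  let s1 : List Char := desc.toList.map (fun ch => if pvOk ch then ch else ' ')
  let s2 : List Char := PySem.Chars.lower (PySem.Chars.strip s1)
  if s2 = [] then "field"
  else String.ofList ((PySem.Chars.split₀ s2).headD [])

-- ===== PORT B =====
-- the for-loop of Source B: buf accumulates lowercased word chars; a non-word char after a
-- non-empty buf is the 'break'
def pvAltGo : List Char → List Char → List Char
  | [], buf => buf
  | c :: rest, buf =>
    if pvOk c then pvAltGo rest (buf ++ [PySem.Chars.lowerChar c])
    else if buf.isEmpty then pvAltGo rest buf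
    else buf

def derive_output_name_py_alt (desc : String) : String :=
  let buf := pvAltGo desc.toList []
  if buf = [] then "field" else String.ofList buf

-- ===== PRECONDITION & SPEC =====
def Spec_derive_output_name_py (desc : String) (out : String) : Prop := out = derive_output_name_py_alt desc
instance (desc : String) (out : String) : Decidable (Spec_derive_output_name_py desc out) := by unfold Spec_derive_output_name_py; infer_instance

-- ===== CLAIM (what is proved, stated in full; the proofs are below) =====
def Claim_equal_derive_output_name_py : Prop := ∀ (desc : String), Dom_derive_output_name_py desc → Spec_derive_output_name_py desc (derive_output_name_py desc)

-- ===== LEMMAS AND PROOFS =====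

-- word characters are never whitespace
theorem pvOk_not_space (c : Char) (h : pvOk c = true) : PySem.Chars.isspace c = false := by
  simp only [pvOk, PySem.Chars.isalnum, PySem.Chars.isalpha, PySem.Chars.isdigit,
    PySem.Chars.isupper, PySem.Chars.islower, Bool.or_eq_true,
    Bool.and_eq_true, decide_eq_true_eq, beq_iff_eq, Char.le_def,
    UInt32.le_iff_toNat_le] at h
  simp only [show ('A'.val.toNat) = 65 from rfl, show ('Z'.val.toNat) = 90 from rfl,
    show ('a'.val.toNat) = 97 from rfl, show ('z'.val.toNat) = 122 from rfl,
    show ('0'.val.toNat) = 48 from rfl, show ('9'.val.toNat) = 57 from rfl] at h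
  have h1 : 48 ≤ c.val.toNat := by
    rcases h with ((⟨ha, hb⟩ | ⟨ha, hb⟩) | ⟨ha, hb⟩) | rfl
    · omega
    · omega
    · omega
    · decide
  have h2 : c.val.toNat ≤ 122 := by
    rcases h with ((⟨ha, hb⟩ | ⟨ha, hb⟩) | ⟨ha, hb⟩) | rfl
    · omega
    · omega
    · omega
    · decide
  clear h
  rw [Bool.eq_false_iff]
  intro hsp
  simp only [PySem.Chars.isspace, Char.toNat, Bool.or_eq_true, Bool.and_eq_true,
    decide_eq_true_eq] at hsp
  omega

-- the substituted character of A is whitespace exactly when the original fails the predicate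
theorem pvSpace_subst (c : Char) :
    PySem.Chars.isspace (if pvOk c then c else ' ') = !pvOk c := by
  by_cases h : pvOk c = true
  · simp [h, pvOk_not_space c h]
  · simp only [Bool.not_eq_true] at h
    simp [h]
    decide

-- lowercasing never changes whitespace-ness
theorem pvSpace_lower (c : Char) :
    PySem.Chars.isspace (PySem.Chars.lowerChar c) = PySem.Chars.isspace c := by
  by_cases h : PySem.Chars.isupper c = true
  · have hns : PySem.Chars.isspace c = false := by
      apply pvOk_not_space
      simp [pvOk, PySem.Chars.isalnum, PySem.Chars.isalpha, h]
    rw [hns]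
    simp only [PySem.Chars.lowerChar, h, if_pos]
    simp only [PySem.Chars.isupper, Bool.and_eq_true, decide_eq_true_eq, Char.le_def,
      UInt32.le_iff_toNat_le] at h
    simp only [show ('A'.val.toNat) = 65 from rfl, show ('Z'.val.toNat) = 90 from rfl] at h
    obtain ⟨h1, h2⟩ := h
    simp only [Char.toNat]
    interval_cases hn : (c.val.toNat) <;> decide
  · simp only [Bool.not_eq_true] at h
    simp [PySem.Chars.lowerChar, h]

theorem pvDropWhile_head_false {α : Type} (p : α → Bool) (l : List α) (c : α) (rest : List α)
    (h : l.dropWhile p = c :: rest) : p c = false := by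
  induction l with
  | nil => simp at h
  | cons a l ih =>
    by_cases ha : p a = true
    · rw [List.dropWhile_cons, if_pos ha] at h; exact ih h
    · simp only [Bool.not_eq_true] at ha
      rw [List.dropWhile_cons, ha] at h
      simp only [Bool.false_eq_true, if_false] at h
      injection h with h1 _
      subst h1; exact ha

theorem pvDropWhile_idem {α : Type} (p : α → Bool) (l : List α) :
    (l.dropWhile p).dropWhile p = l.dropWhile p := by
  cases h : l.dropWhile p with
  | nil => rfl
  | cons c rest =>
    rw [List.dropWhile_cons, pvDropWhile_head_false p l c rest h]
    simp

theorem pvMem_takeWhile {α : Type} (p : α → Bool) (l : List α) (a : α)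
    (h : a ∈ l.takeWhile p) : p a = true := by
  induction l with
  | nil => simp at h
  | cons c l ih =>
    by_cases hc : p c = true
    · rw [List.takeWhile_cons, if_pos hc] at h
      rcases List.mem_cons.1 h with h | h
      · rw [h]; exact hc
      · exact ih h
    · simp only [Bool.not_eq_true] at hc
      rw [List.takeWhile_cons, hc] at h
      simp at h

theorem pvTakeWhile_append_nil {α : Type} (q : α → Bool) (xs ys : List α)
    (h : ys.takeWhile q = []) : (xs ++ ys).takeWhile q = xs.takeWhile q := by
  induction xs with
  | nil => simpa using h
  | cons c xs ih => by_cases hc : q c = true <;> simp [hc, ih]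

-- the first whitespace-separated token ignores an all-whitespace suffix
theorem pvFirstTok_append_allp (p : Char → Bool) (xs ys : List Char)
    (h : ∀ y ∈ ys, p y = true) :
    ((xs ++ ys).dropWhile p).takeWhile (fun c => !p c) =
      (xs.dropWhile p).takeWhile (fun c => !p c) := by
  have hys : ys.takeWhile (fun c => !p c) = [] := by
    cases ys with
    | nil => rfl
    | cons y ys => simp [h y (List.mem_cons_self)]
  induction xs with
  | nil =>
    simp only [List.nil_append, List.dropWhile_nil]
    rw [List.dropWhile_eq_nil_iff.2 h]
  | cons c xs ih =>
    by_cases hc : p c = true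
    · simpa [List.dropWhile_cons, hc] using ih
    · simp only [Bool.not_eq_true] at hc
      simp only [List.cons_append, List.dropWhile_cons, hc, Bool.false_eq_true, if_false,
        List.takeWhile_cons, Bool.not_false, if_pos]
      rw [pvTakeWhile_append_nil _ xs ys hys]

-- the first token of rstrip w is the first token of w
theorem pvFirstTok_rstrip (w : List Char) :
    ((PySem.Chars.rstrip w).dropWhile PySem.Chars.isspace).takeWhile (fun c => !PySem.Chars.isspace c) =
      (w.dropWhile PySem.Chars.isspace).takeWhile (fun c => !PySem.Chars.isspace c) := by
  have hw : w = PySem.Chars.rstrip w ++ (w.reverse.takeWhile PySem.Chars.isspace).reverse := by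
    rw [PySem.Chars.rstrip, ← List.reverse_append, List.takeWhile_append_dropWhile,
      List.reverse_reverse]
  conv_rhs => rw [hw]
  rw [pvFirstTok_append_allp]
  intro y hy
  exact pvMem_takeWhile _ _ _ (List.mem_reverse.1 hy)

-- split₀.go with a non-empty accumulator prepends it
theorem pvGo_acc (s cur acc) : PySem.Chars.split₀.go s cur acc =
    acc.reverse ++ PySem.Chars.split₀.go s cur [] := by
  induction s generalizing cur acc with
  | nil =>
    by_cases hcur : cur.isEmpty = true <;> simp [PySem.Chars.split₀.go, hcur]
  | cons c rest ih =>
    by_cases hc : PySem.Chars.isspace c = true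
    · by_cases hcur : cur.isEmpty = true
      · simp only [PySem.Chars.split₀.go, hc, hcur, if_pos]
        exact ih [] acc
      · simp only [PySem.Chars.split₀.go, hc, hcur, if_pos, Bool.false_eq_true, if_false]
        rw [ih [] (cur.reverse :: acc), ih [] [cur.reverse]]
        simp
    · simp only [PySem.Chars.split₀.go, hc, Bool.false_eq_true, if_false]
      exact ih (c :: cur) acc

theorem pvGo_head_cur (s : List Char) (cur : List Char) (h : cur ≠ []) :
    (PySem.Chars.split₀.go s cur []).headD [] =
      cur.reverse ++ s.takeWhile (fun c => !PySem.Chars.isspace c) := by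
  induction s generalizing cur with
  | nil =>
    have : cur.isEmpty = false := by simpa [List.isEmpty_iff] using h
    simp [PySem.Chars.split₀.go, this]
  | cons c rest ih =>
    by_cases hc : PySem.Chars.isspace c = true
    · have : cur.isEmpty = false := by simpa [List.isEmpty_iff] using h
      simp only [PySem.Chars.split₀.go, hc, this, if_pos, Bool.false_eq_true, if_false]
      rw [pvGo_acc]
      simp [hc]
    · simp only [PySem.Chars.split₀.go, hc, Bool.false_eq_true, if_false]
      rw [ih (c :: cur) (List.cons_ne_nil c cur)]
      simp [hc]

-- the first element of s.split() is the first whitespace-separated token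
theorem pvSplit₀_headD (s : List Char) :
    (PySem.Chars.split₀ s).headD [] =
      (s.dropWhile PySem.Chars.isspace).takeWhile (fun c => !PySem.Chars.isspace c) := by
  rw [PySem.Chars.split₀]
  induction s with
  | nil => rfl
  | cons c rest ih =>
    by_cases hc : PySem.Chars.isspace c = true
    · simpa [PySem.Chars.split₀.go, hc, List.dropWhile_cons] using ih
    · simp only [PySem.Chars.split₀.go, hc, Bool.false_eq_true, if_false,
        List.dropWhile_cons, List.takeWhile_cons, Bool.not_false, if_pos]
      rw [pvGo_head_cur rest [c] (List.cons_ne_nil c [])]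
      simp

-- B's loop computes the first run of pvOk-characters, lowercased
theorem pvAltGo_ne_nil (s buf : List Char) (h : buf ≠ []) :
    pvAltGo s buf = buf ++ (s.takeWhile pvOk).map PySem.Chars.lowerChar := by
  induction s generalizing buf with
  | nil => simp [pvAltGo]
  | cons c rest ih =>
    by_cases hc : pvOk c = true
    · simp only [pvAltGo, hc, if_pos, List.takeWhile_cons, List.map_cons]
      rw [ih (buf ++ [PySem.Chars.lowerChar c]) (by simp)]
      simp
    · have hb : buf.isEmpty = false := by simpa [List.isEmpty_iff] using h
      simp [pvAltGo, hc, hb]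

theorem pvAltGo_nil (s : List Char) :
    pvAltGo s [] = ((s.dropWhile (fun c => !pvOk c)).takeWhile pvOk).map PySem.Chars.lowerChar := by
  induction s with
  | nil => rfl
  | cons c rest ih =>
    by_cases hc : pvOk c = true
    · simp only [pvAltGo, hc, if_pos, List.dropWhile_cons, Bool.not_true, Bool.false_eq_true,
        if_false, List.takeWhile_cons, List.map_cons, List.nil_append]
      exact pvAltGo_ne_nil rest [PySem.Chars.lowerChar c] (List.cons_ne_nil _ _)
    · have hc' : pvOk c = false := by simpa using hc
      simp [pvAltGo, hc', ih]

-- ===== VERDICT (by name: the statement is the Claim_ definition above) =====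
theorem derive_output_name_py_spec : Claim_equal_derive_output_name_py := by
  intro desc _
  unfold Spec_derive_output_name_py derive_output_name_py derive_output_name_py_alt
  simp only
  set cs : List Char := desc.toList with hcs
  set f : Char → Char := fun ch => if pvOk ch then ch else ' ' with hf
  -- the substituted character is whitespace exactly when the original fails the predicate
  have hpf : (PySem.Chars.isspace ∘ f) = fun c => !pvOk c := by
    funext c; simp [hf, Function.comp, pvSpace_subst]
  -- leading whitespace of the substituted string ↔ leading non-word chars of cs
  have hdrop : (cs.map f).dropWhile PySem.Chars.isspace = (cs.dropWhile (fun c => !pvOk c)).map f := by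
    rw [List.dropWhile_map, hpf]
  rw [pvAltGo_nil]
  set d : List Char := cs.dropWhile (fun c => !pvOk c) with hd
  cases hdc : d with
  | nil =>
    -- no word character at all: both return "field"
    have hstrip : PySem.Chars.strip (cs.map f) = [] := by
      rw [PySem.Chars.strip, PySem.Chars.lstrip, hdrop, hdc]
      rfl
    simp [hstrip, PySem.Chars.lower]
  | cons c d' =>
    have hokc : pvOk c = true := by
      have := pvDropWhile_head_false (fun c => !pvOk c) cs c d' (hd ▸ hdc)
      simpa using this
    -- the stripped string is non-empty
    have hlstrip : PySem.Chars.lstrip (cs.map f) = c :: d'.map f := by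
      rw [PySem.Chars.lstrip, hdrop, hdc, List.map_cons]
      simp [hf, hokc]
    have hstrip_ne : PySem.Chars.strip (cs.map f) ≠ [] := by
      rw [PySem.Chars.strip, hlstrip, PySem.Chars.rstrip]
      intro hnil
      have hall : ∀ x ∈ (c :: d'.map f).reverse, PySem.Chars.isspace x = true := by
        rw [← List.dropWhile_eq_nil_iff]
        simpa using hnil
      have := hall c (by simp)
      rw [pvOk_not_space c hokc] at this
      exact Bool.false_ne_true this
    have hs2ne : ¬ (PySem.Chars.lower (PySem.Chars.strip (cs.map f)) = []) := by
      rw [PySem.Chars.lower]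
      simpa using hstrip_ne
    rw [if_neg hs2ne]
    have hbufne : ¬ (((c :: d').takeWhile pvOk).map PySem.Chars.lowerChar = []) := by
      rw [List.takeWhile_cons, if_pos hokc]
      simp
    rw [if_neg hbufne]
    -- both sides are ofList of the same character list
    congr 1
    rw [pvSplit₀_headD, PySem.Chars.lower, List.dropWhile_map, List.takeWhile_map]
    have hplc : (PySem.Chars.isspace ∘ PySem.Chars.lowerChar) = PySem.Chars.isspace := by
      funext x; simp [Function.comp, pvSpace_lower]
    have hplc' : ((fun c => !PySem.Chars.isspace c) ∘ PySem.Chars.lowerChar)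
        = (fun c => !PySem.Chars.isspace c) := by
      funext x; simp [Function.comp, pvSpace_lower]
    rw [hplc, hplc']
    congr 1
    rw [PySem.Chars.strip, pvFirstTok_rstrip, PySem.Chars.lstrip, pvDropWhile_idem, hdrop]
    rw [List.takeWhile_map]
    have hokf : ((fun c => !PySem.Chars.isspace c) ∘ f) = pvOk := by
      funext x; simp [hf, Function.comp, pvSpace_subst]
    rw [hokf, hdc, List.takeWhile_cons, if_pos hokc]
    simp only [List.map_cons, List.cons.injEq]
    refine ⟨by simp [hf, hokc], ?_⟩
    have hfid : ∀ a ∈ d'.takeWhile pvOk, f a = a := by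
      intro a ha
      simp [hf, pvMem_takeWhile pvOk d' a ha]
    rw [List.map_congr_left hfid]
    exact List.map_id' _
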